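-- pv_equiv track=rewrite | github.com/etilonii/FantaPortoscuso | scripts/build_season_predictions.py | _format_event_counts
-- ===== SOURCE A (Python) =====
-- from collections import defaultdict
-- from typing import Any, Dict, Iterable, List, Optional, Tuple
--
-- def _format_event_counts(players: List[str]) -> str:
--     if not players:
--         return ""
--     counts: Dict[str, int] = defaultdict(int)
--     for name in players:
--         counts[name] += 1
--     parts = []
--     for name, qty in counts.items():
--         if qty <= 1:
--             parts.append(name)
--         else:
--             parts.append(f"{name} x{qty}")
--     return "; ".join(parts)
-- ===== SOURCE B (Python) =====
-- from typing import List
--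
--
-- def _format_event_counts(players: List[str]) -> str:
--     if not players:
--         return ""
--     parts = []
--     rest = players
--     while rest:
--         name, tail = rest[0], rest[1:]
--         qty = 1 + sum(1 for x in tail if x == name)
--         parts.append(name if qty <= 1 else f"{name} x{qty}")
--         rest = [x for x in tail if x != name]
--     return "; ".join(parts)
-- ===== Notes on version B (the rewrite author's own statement) =====
-- stated objective: alternative
-- what changed: Replaces A's single defaultdict counting pass plus items formatting by a dict-free partition loop: repeatedly take the first remaining name, count its occurrences in the tail by a scan, emit its part, and delete all its occurrences before continuing.
import Mathlib
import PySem

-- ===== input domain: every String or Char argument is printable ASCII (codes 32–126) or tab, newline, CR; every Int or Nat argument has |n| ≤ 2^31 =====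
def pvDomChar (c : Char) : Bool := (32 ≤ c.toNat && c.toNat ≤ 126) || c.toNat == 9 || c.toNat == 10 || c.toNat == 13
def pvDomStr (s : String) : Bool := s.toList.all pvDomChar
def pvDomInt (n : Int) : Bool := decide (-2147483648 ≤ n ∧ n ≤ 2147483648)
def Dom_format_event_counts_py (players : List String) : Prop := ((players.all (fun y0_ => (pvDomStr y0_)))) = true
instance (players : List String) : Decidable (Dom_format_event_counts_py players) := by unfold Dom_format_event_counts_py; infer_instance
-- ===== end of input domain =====

-- B replaces A's one-pass defaultdict counting by a dict-free partition loop (take first name, count it in the tail, delete its occurrences, recurse): alternative algorithm, same output.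


-- ===== PORT A =====
-- A: counts into a defaultdict in one pass, then formats its items.
def format_event_counts_py (players : List String) : String :=
  if players = [] then ""
  else
    let counts := players.foldl (fun d name => d.modify name 0 (· + 1)) (PySem.Dict.empty : PySem.Dict String Int)
    let parts := counts.items.foldl
      (fun parts p => parts ++ [if p.2 ≤ 1 then p.1 else p.1 ++ " x" ++ PySem.Int.toStr p.2])
      ([] : List String)
    PySem.Str.join "; " parts

-- ===== PORT B =====
-- B's while loop: take the first remaining name, count it in the tail, emit its part,
-- drop all its occurrences, continue on what is left.
def fecGo (rest : List String) : List String :=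
  match rest with
  | [] => []
  | name :: tail =>
    let qty : Int := 1 + (tail.countP (· == name) : Int)
    (if qty ≤ 1 then name else name ++ " x" ++ PySem.Int.toStr qty)
      :: fecGo (tail.filter (· != name))
termination_by rest.length
decreasing_by simp; exact List.length_filter_le _ _

def format_event_counts_py_alt (players : List String) : String :=
  if players = [] then "" else PySem.Str.join "; " (fecGo players)

-- ===== PRECONDITION & SPEC =====
def Spec_format_event_counts_py (players : List String) (out : String) : Prop := out = format_event_counts_py_alt players
instance (players : List String) (out : String) : Decidable (Spec_format_event_counts_py players out) := by unfold Spec_format_event_counts_py; infer_instance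

-- ===== CLAIM (what is proved, stated in full; the proofs are below) =====
def Claim_equal_format_event_counts_py : Prop := ∀ (players : List String), Dom_format_event_counts_py players → Spec_format_event_counts_py players (format_event_counts_py players)

-- ===== LEMMAS AND PROOFS =====

-- the common formatted part for a name with count q
def fecFmt (name : String) (q : Int) : String :=
  if q ≤ 1 then name else name ++ " x" ++ PySem.Int.toStr q

theorem foldl_add_of_mem (a : String) (l : List String) :
    ∀ acc : List String, a ∈ acc →
      List.foldl PySem.Set.add acc l = List.foldl PySem.Set.add acc (l.filter (· != a)) := by
  induction l with
  | nil => intro acc _; rfl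
  | cons x l ih =>
    intro acc ha
    by_cases hx : x = a
    · subst hx
      simp only [List.filter_cons, bne_self_eq_false, if_neg]
      have : PySem.Set.add acc x = acc := by
        simp [PySem.Set.add, PySem.Set.contains, ha]
      simp only [List.foldl_cons, this]
      exact ih acc ha
    · have : (x != a) = true := by simp [bne, hx]
      simp only [List.filter_cons, this, if_pos, List.foldl_cons]
      apply ih
      simp [PySem.Set.add]
      split
      · exact ha
      · exact List.mem_append_left _ ha

theorem foldl_add_cons (a : String) (m : List String) :
    ∀ s : List String, (∀ x ∈ m, x ≠ a) →
      List.foldl PySem.Set.add (a :: s) m = a :: List.foldl PySem.Set.add s m := by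
  induction m with
  | nil => intro s _; rfl
  | cons x m ih =>
    intro s h
    have hx : x ≠ a := h x (List.mem_cons_self ..)
    have : PySem.Set.add (a :: s) x = a :: PySem.Set.add s x := by
      by_cases hs : x ∈ s
      · simp [PySem.Set.add, hs, hx]
      · simp [PySem.Set.add, hs, hx]
    simp only [List.foldl_cons, this]
    exact ih _ (fun y hy => h y (List.mem_cons_of_mem _ hy))

theorem dedup_cons_filter (a : String) (l : List String) :
    PySem.List.dedup (a :: l) = a :: PySem.List.dedup (l.filter (· != a)) := by
  show List.foldl PySem.Set.add PySem.Set.empty (a :: l) = _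
  have h0 : List.foldl PySem.Set.add PySem.Set.empty (a :: l)
      = List.foldl PySem.Set.add [a] l := rfl
  rw [h0, foldl_add_of_mem a l [a] (List.mem_singleton.mpr rfl),
    foldl_add_cons a _ []]
  · rfl
  · intro x hx
    have := (List.mem_filter.mp hx).2
    simpa [bne] using this

-- B's loop computes, for each distinct name in first-appearance order, its count in rest
theorem fecGo_eq_map (rest : List String) :
    fecGo rest = (PySem.List.dedup rest).map (fun name => fecFmt name (rest.count name)) := by
  induction hlen : rest.length using Nat.strong_induction_on generalizing rest with
  | _ n ih =>
  match rest with
  | [] => rw [fecGo]; rfl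
  | name :: tail =>
    have IH := ih (tail.filter (· != name)).length
      (by subst hlen; simp; exact List.length_filter_le _ _)
      (tail.filter (· != name)) rfl
    rw [fecGo, dedup_cons_filter, List.map_cons, IH]
    congr 1
    · show fecFmt name (1 + (tail.countP (· == name) : Int)) = _
      have hc : (name :: tail).count name = tail.countP (· == name) + 1 := by
        rw [List.count_cons_self]; rfl
      rw [hc]; congr 1; push_cast; ring
    · apply List.map_congr_left
      intro x hx
      have hxf : x ∈ tail.filter (· != name) := (PySem.List.mem_dedup _ _).mp hx
      have hxne : x ≠ name := by
        have := (List.mem_filter.mp hxf).2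
        simpa [bne] using this
      have hcount : List.count x (List.filter (· != name) tail) = List.count x (name :: tail) := by
        rw [List.count_filter (by simp [bne]; exact hxne)]
        simp [List.count_cons]
        exact fun h => hxne h.symm
      rw [hcount]

-- ===== VERDICT (by name: the statement is the Claim_ definition above) =====
theorem format_event_counts_py_spec : Claim_equal_format_event_counts_py := by
  intro players _
  unfold Spec_format_event_counts_py format_event_counts_py format_event_counts_py_alt
  by_cases h : players = []
  · simp [h]
  · simp only [h, if_false]
    rw [PySem.List.foldl_append_singleton_eq_map, List.nil_append,
      show players.foldl (fun d name => d.modify name 0 (· + 1))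
          (PySem.Dict.empty : PySem.Dict String Int) = PySem.Dict.counter players from rfl,
      PySem.Dict.items_counter, List.map_map, fecGo_eq_map]
    rfl
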